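-- pv_equiv track=rewrite | github.com/lutteropp/NetRAX | experiments/src/bug_finder.py | trimmed_ranges
-- ===== SOURCE A (Python) =====
-- def trimmed_ranges(orig_ranges, deleted_cols):
--     trimmed_ranges = []
--     deleted_cols.sort()
--     for r in range(len(orig_ranges)):
--         current_start = orig_ranges[r][0]
--         current_end = orig_ranges[r][1]
--         # we need to know how many columns have been deleted before current start
--         n_before_start = len([c for c in deleted_cols if c < current_start])
--         # and we need to know how many columns have been deleted before current end
--         n_before_end = len([c for c in deleted_cols if c <= current_end])
--         # this gives us the new partition range
--         trimmed_ranges.append((current_start - n_before_start, current_end - n_before_end))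
--     return trimmed_ranges
-- ===== SOURCE B (Python) =====
-- def _bisect_left(a, x):
--     lo, hi = 0, len(a)
--     while lo < hi:
--         mid = (lo + hi) // 2
--         if a[mid] < x:
--             lo = mid + 1
--         else:
--             hi = mid
--     return lo
--
--
-- def _bisect_right(a, x):
--     lo, hi = 0, len(a)
--     while lo < hi:
--         mid = (lo + hi) // 2
--         if a[mid] <= x:
--             lo = mid + 1
--         else:
--             hi = mid
--     return lo
--
--
-- def trimmed_ranges(orig_ranges, deleted_cols):
--     # same in-place sort of deleted_cols as the original
--     deleted_cols.sort()
--     return [(r[0] - _bisect_left(deleted_cols, r[0]),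
--              r[1] - _bisect_right(deleted_cols, r[1]))
--             for r in orig_ranges]
-- ===== Notes on version B (the rewrite author's own statement) =====
-- stated objective: faster
-- what changed: Per-range linear filter counts over deleted_cols are replaced by binary searches (bisect_left for the start, bisect_right for the end) on the sorted deleted_cols list, so each range costs O(log n) instead of O(n); the in-place sort of deleted_cols is kept.
import Mathlib
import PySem

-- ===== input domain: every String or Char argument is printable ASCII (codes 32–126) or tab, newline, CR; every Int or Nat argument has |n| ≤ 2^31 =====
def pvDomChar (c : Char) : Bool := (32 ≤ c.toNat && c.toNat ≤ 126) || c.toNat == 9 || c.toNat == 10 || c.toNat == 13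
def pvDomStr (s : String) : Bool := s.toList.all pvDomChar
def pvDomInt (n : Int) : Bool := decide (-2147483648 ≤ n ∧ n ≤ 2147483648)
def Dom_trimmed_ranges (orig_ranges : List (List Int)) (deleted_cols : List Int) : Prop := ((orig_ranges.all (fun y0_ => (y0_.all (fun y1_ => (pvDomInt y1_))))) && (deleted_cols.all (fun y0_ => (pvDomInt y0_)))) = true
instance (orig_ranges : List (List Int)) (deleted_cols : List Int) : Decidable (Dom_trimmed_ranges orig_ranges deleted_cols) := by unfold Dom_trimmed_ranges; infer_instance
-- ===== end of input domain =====

-- B replaces A's per-range linear filter counts with binary searches on the sorted deleted_cols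
-- (equivalence is about the return value; both A and B sort deleted_cols in place).

-- ===== PORT A =====
-- Python tuples (start, end) are returned; under the type convention the result rows are 2-element lists.
def trimmed_ranges (orig_ranges : List (List Int)) (deleted_cols : List Int) : List (List Int) :=
  let dc := PySem.List.sorted deleted_cols id false   -- deleted_cols.sort()
  (PySem.List.pyRange 0 (orig_ranges.length : Int) 1).foldl (fun acc r =>
    -- Pre_ guarantees the inner list has ≥ 2 entries, so pyGetD never hits its default
    let row := PySem.List.pyGetD orig_ranges r []
    let current_start := PySem.List.pyGetD row 0 0
    let current_end := PySem.List.pyGetD row 1 0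
    let n_before_start : Int := ((dc.filter (fun c => c < current_start)).length : Int)
    let n_before_end : Int := ((dc.filter (fun c => c ≤ current_end)).length : Int)
    acc ++ [[current_start - n_before_start, current_end - n_before_end]]) []

-- ===== PORT B =====
-- Source B's hand-written _bisect_left/_bisect_right are the standard binary searches,
-- ported as the prelude's PySem.List.bisectLeft / bisectRight (same algorithm).
def trimmed_ranges_alt (orig_ranges : List (List Int)) (deleted_cols : List Int) : List (List Int) :=
  let dc := PySem.List.sorted deleted_cols id false   -- deleted_cols.sort()
  orig_ranges.map (fun r =>
    let s := PySem.List.pyGetD r 0 0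
    let e := PySem.List.pyGetD r 1 0
    [s - (PySem.List.bisectLeft dc s : Int), e - (PySem.List.bisectRight dc e : Int)])

-- ===== PRECONDITION & SPEC =====
-- Pre_ excludes exactly the inputs where Python A raises IndexError: an inner list with
-- fewer than 2 entries (A reads orig_ranges[r][0] and orig_ranges[r][1]).
def Pre_trimmed_ranges (orig_ranges : List (List Int)) (deleted_cols : List Int) : Prop :=
  ∀ r ∈ orig_ranges, 2 ≤ r.length
instance (orig_ranges : List (List Int)) (deleted_cols : List Int) : Decidable (Pre_trimmed_ranges orig_ranges deleted_cols) := by unfold Pre_trimmed_ranges; infer_instance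

def pvWitness_trimmed_ranges : List (List Int) × List Int := ([[0, 3], [5, 9]], [1, 6, 6])

def Spec_trimmed_ranges (orig_ranges : List (List Int)) (deleted_cols : List Int) (out : List (List Int)) : Prop := out = trimmed_ranges_alt orig_ranges deleted_cols
instance (orig_ranges : List (List Int)) (deleted_cols : List Int) (out : List (List Int)) : Decidable (Spec_trimmed_ranges orig_ranges deleted_cols out) := by unfold Spec_trimmed_ranges; infer_instance

-- ===== CLAIM (what is proved, stated in full; the proofs are below) =====
def Claim_equal_trimmed_ranges : Prop := ∀ (orig_ranges : List (List Int)) (deleted_cols : List Int), Dom_trimmed_ranges orig_ranges deleted_cols → Pre_trimmed_ranges orig_ranges deleted_cols → Spec_trimmed_ranges orig_ranges deleted_cols (trimmed_ranges orig_ranges deleted_cols)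

-- ===== LEMMAS AND PROOFS =====

/-- If a predicate holds at exactly the first `k` positions of a list, its count is `k`. -/
theorem countP_eq_of_index {α : Type} (p : α → Bool) :
    ∀ (l : List α) (k : Nat), k ≤ l.length →
    (∀ (j : Nat) (hj : j < l.length), j < k → p l[j]) →
    (∀ (j : Nat) (hj : j < l.length), k ≤ j → ¬ p l[j]) →
    l.countP p = k := by
  intro l
  induction l with
  | nil => intro k hk _ _; simp at hk; simp [hk]
  | cons a t ih =>
    intro k hk h1 h2
    cases k with
    | zero =>
      have ha : ¬ p a := h2 0 (by simp) (Nat.zero_le _)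
      have ht : t.countP p = 0 := by
        apply ih 0 (Nat.zero_le _)
        · intro j hj hj0; omega
        · intro j hj _
          exact h2 (j + 1) (by simpa using Nat.succ_lt_succ hj) (Nat.zero_le _)
      simp [ha, ht]
    | succ k' =>
      have ha : p a := h1 0 (by simp) (Nat.succ_pos _)
      have ht : t.countP p = k' := by
        apply ih k' (by simp at hk; omega)
        · intro j hj hjk
          exact h1 (j + 1) (by simpa using Nat.succ_lt_succ hj) (Nat.succ_lt_succ hjk)
        · intro j hj hjk
          exact h2 (j + 1) (by simpa using Nat.succ_lt_succ hj) (Nat.succ_le_succ hjk)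
      simp [ha, ht]

theorem filter_lt_eq_bisectLeft (dc : List Int) (hs : dc.Pairwise (· ≤ ·)) (x : Int) :
    (dc.filter (fun c => c < x)).length = PySem.List.bisectLeft dc x := by
  obtain ⟨hle, h1, h2⟩ := PySem.List.bisectLeft_spec dc x hs
  rw [← List.countP_eq_length_filter]
  exact countP_eq_of_index _ dc _ hle
    (fun j hj hjk => by simpa using h1 j hj hjk)
    (fun j hj hjk => by simpa using not_lt.mpr (h2 j hj hjk))

theorem filter_le_eq_bisectRight (dc : List Int) (hs : dc.Pairwise (· ≤ ·)) (x : Int) :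
    (dc.filter (fun c => c ≤ x)).length = PySem.List.bisectRight dc x := by
  obtain ⟨hle, h1, h2⟩ := PySem.List.bisectRight_spec dc x hs
  rw [← List.countP_eq_length_filter]
  exact countP_eq_of_index _ dc _ hle
    (fun j hj hjk => by simpa using h1 j hj hjk)
    (fun j hj hjk => by simpa using not_le.mpr (h2 j hj hjk))

-- ===== VERDICT (by name: the statement is the Claim_ definition above) =====
theorem trimmed_ranges_spec : Claim_equal_trimmed_ranges := by
  intro orig_ranges deleted_cols _hdom _hpre
  unfold Spec_trimmed_ranges trimmed_ranges trimmed_ranges_alt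
  set dc := PySem.List.sorted deleted_cols id false with hdc
  have hs : dc.Pairwise (· ≤ ·) := by
    simpa using PySem.List.sorted_pairwise deleted_cols id
  rw [PySem.List.foldl_append_singleton_eq_map, List.nil_append]
  conv_rhs => rw [← PySem.List.map_pyGetD_pyRange_zero' orig_ranges ([] : List Int), List.map_map]
  refine List.map_congr_left ?_
  intro r _
  simp only [Function.comp_apply]
  rw [filter_lt_eq_bisectLeft dc hs, filter_le_eq_bisectRight dc hs]
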